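-- pv_equiv track=rewrite | github.com/rgwohlbold/uab-contest | 03.py | phone
-- ===== SOURCE A (Python) =====
-- def phone(numbers):
--
--     # How many numbers for each region
--     dallas, tallahassee, birmingham, nashville, other = 0,0,0,0,0
--
--     for number in numbers:
--
--         # The tail of the number is the last 7 digits, so a floor division removes it and leaves the area code
--         area = number // 10000000
--
--         # Increment locations based on area code
--         if area == 469:
--             dallas += 1
--         elif area == 850:
--             tallahassee += 1
--         elif area == 205:
--             birmingham += 1
--         elif area == 615:
--             nashville += 1
--         else:
--             other += 1
--
--     # Return total number of repective area codes
--     return [dallas, tallahassee, birmingham, nashville, other]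
-- ===== SOURCE B (Python) =====
-- def phone(numbers):
--     # Staged passes: materialize all area codes once, then use list.count
--     # for each named code (four separate scans); 'other' is derived by
--     # subtraction from the total.
--     areas = [n // 10000000 for n in numbers]
--     counts = [areas.count(c) for c in (469, 850, 205, 615)]
--     return counts + [len(areas) - sum(counts)]
-- ===== Notes on version B (the rewrite author's own statement) =====
-- stated objective: idiomatic
-- what changed: B replaces A's single classifying loop with five counters by staged passes: it maps every number to its area code once, then counts each of the four named codes with list.count (four independent scans) and derives 'other' as the total length minus the sum of the four counts.
import Mathlib
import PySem

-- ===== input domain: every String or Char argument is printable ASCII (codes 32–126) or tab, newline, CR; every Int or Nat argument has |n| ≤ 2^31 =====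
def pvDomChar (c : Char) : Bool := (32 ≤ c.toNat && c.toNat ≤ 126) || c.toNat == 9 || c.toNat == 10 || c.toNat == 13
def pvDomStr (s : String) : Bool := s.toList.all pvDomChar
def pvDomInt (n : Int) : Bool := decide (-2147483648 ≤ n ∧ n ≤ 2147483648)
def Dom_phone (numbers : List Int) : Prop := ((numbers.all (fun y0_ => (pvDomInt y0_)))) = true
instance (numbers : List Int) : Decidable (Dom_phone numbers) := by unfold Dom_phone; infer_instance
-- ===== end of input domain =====

-- B replaces A's single classifying loop (five counters, if/elif chain) by staged
-- passes: map every number to its area code, count each named code with list.count,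
-- derive 'other' by subtraction (idiomatic; same return value).

-- ===== PORT A =====
-- A's loop: five counters, classify each number's area code by an if/elif chain.
def phoneStep (st : Int × Int × Int × Int × Int) (number : Int) : Int × Int × Int × Int × Int :=
  let area := PySem.Int.floordiv number 10000000
  let (dallas, tallahassee, birmingham, nashville, other) := st
  if area = 469 then (dallas + 1, tallahassee, birmingham, nashville, other)
  else if area = 850 then (dallas, tallahassee + 1, birmingham, nashville, other)
  else if area = 205 then (dallas, tallahassee, birmingham + 1, nashville, other)
  else if area = 615 then (dallas, tallahassee, birmingham, nashville + 1, other)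
  else (dallas, tallahassee, birmingham, nashville, other + 1)

def phone (numbers : List Int) : List Int :=
  let (dallas, tallahassee, birmingham, nashville, other) :=
    numbers.foldl phoneStep (0, 0, 0, 0, 0)
  [dallas, tallahassee, birmingham, nashville, other]

-- ===== PORT B =====
def phone_alt (numbers : List Int) : List Int :=
  let areas := numbers.map (fun n => PySem.Int.floordiv n 10000000)
  let counts := [(469 : Int), 850, 205, 615].map (fun c => (PySem.List.count areas c : Int))
  counts ++ [(areas.length : Int) - counts.sum]

-- ===== PRECONDITION & SPEC =====
def Spec_phone (numbers : List Int) (out : List Int) : Prop := out = phone_alt numbers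
instance (numbers : List Int) (out : List Int) : Decidable (Spec_phone numbers out) := by unfold Spec_phone; infer_instance

-- ===== CLAIM =====
def Claim_equal_phone : Prop := ∀ (numbers : List Int), Dom_phone numbers → Spec_phone numbers (phone numbers)

-- ===== LEMMAS AND PROOFS =====
def areaOf (n : Int) : Int := PySem.Int.floordiv n 10000000

-- A's fold, characterised: each counter equals its start plus the count of matching area codes.
theorem phoneStep_foldl (l : List Int) (d t b n o : Int) :
    l.foldl phoneStep (d, t, b, n, o) =
      (d + ((l.map areaOf).count 469 : Int),
       t + ((l.map areaOf).count 850 : Int),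
       b + ((l.map areaOf).count 205 : Int),
       n + ((l.map areaOf).count 615 : Int),
       o + ((l.countP (fun x => !(areaOf x == 469 || areaOf x == 850 ||
              areaOf x == 205 || areaOf x == 615)) : Int))) := by
  induction l generalizing d t b n o with
  | nil => simp
  | cons x xs ih =>
    simp only [List.foldl_cons, List.map_cons, phoneStep, areaOf, List.countP_cons]
    by_cases h1 : PySem.Int.floordiv x 10000000 = 469 <;>
    by_cases h2 : PySem.Int.floordiv x 10000000 = 850 <;>
    by_cases h3 : PySem.Int.floordiv x 10000000 = 205 <;>
    by_cases h4 : PySem.Int.floordiv x 10000000 = 615 <;>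
      simp_all [areaOf] <;> ring

theorem count_areas (l : List Int) :
    (l.countP (fun x => !(areaOf x == 469 || areaOf x == 850 ||
        areaOf x == 205 || areaOf x == 615)))
      = l.length - ((l.map areaOf).count 469 + (l.map areaOf).count 850 +
          (l.map areaOf).count 205 + (l.map areaOf).count 615) ∧
    ((l.map areaOf).count 469 + (l.map areaOf).count 850 +
          (l.map areaOf).count 205 + (l.map areaOf).count 615) ≤ l.length := by
  induction l with
  | nil => simp
  | cons x xs ih =>
    obtain ⟨h1, h2⟩ := ih
    simp only [List.countP_cons, List.map_cons, List.count_cons, List.length_cons]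
    by_cases a1 : areaOf x = 469 <;> by_cases a2 : areaOf x = 850 <;>
    by_cases a3 : areaOf x = 205 <;> by_cases a4 : areaOf x = 615 <;>
      simp_all <;> omega

theorem phone_spec : Claim_equal_phone := by
  intro numbers _
  unfold Spec_phone phone phone_alt
  have harea : (fun n : Int => PySem.Int.floordiv n 10000000) = areaOf := rfl
  rw [harea, phoneStep_foldl]
  obtain ⟨h1, h2⟩ := count_areas numbers
  simp only [PySem.List.count_eq, List.map_cons, List.map_nil, List.cons_append,
    List.nil_append, List.sum_cons, List.sum_nil, List.length_map, List.cons.injEq, and_true]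
  refine ⟨by ring, by ring, by ring, by ring, ?_⟩
  rw [h1]
  push_cast [h2]
  ring
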